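-- pv_equiv track=rewrite | github.com/Ankitha8105/Python_DataType | Tuple_prgms/5_RepeatedEle.py | repeated_ele
-- ===== SOURCE A (Python) =====
-- def repeated_ele(tuple_ele):
--     """
--     Description :
--         This function is used to find the repeated items of a tuple
--     Parameter :
--         tuple_ele = tuple elements
--     Return :
--         It return the repeated items from the tuple
--     """
--     repeat_ele = []
--     for i in range(0,len(tuple_ele)):
--         for j in range(i+1,len(tuple_ele)):
--             if tuple_ele[i] == tuple_ele[j]:
--                 repeat_ele.append(tuple_ele[i])
--
--     tuple_repeat = tuple(repeat_ele)
--     return tuple_repeat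
-- ===== SOURCE B (Python) =====
-- def repeated_ele(tuple_ele):
--     total = {}
--     for v in tuple_ele:
--         total[v] = total.get(v, 0) + 1
--     seen = {}
--     out = []
--     for v in tuple_ele:
--         seen[v] = seen.get(v, 0) + 1
--         out.extend([v] * (total[v] - seen[v]))
--     return tuple(out)
-- ===== Notes on version B (the rewrite author's own statement) =====
-- stated objective: alternative
-- what changed: Replaces the quadratic all-pairs index scan with two linear dict passes: count totals once, then per position append the value (total-seen) times, so cost is O(n + output size) instead of O(n^2) scanning.
import Mathlib
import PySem

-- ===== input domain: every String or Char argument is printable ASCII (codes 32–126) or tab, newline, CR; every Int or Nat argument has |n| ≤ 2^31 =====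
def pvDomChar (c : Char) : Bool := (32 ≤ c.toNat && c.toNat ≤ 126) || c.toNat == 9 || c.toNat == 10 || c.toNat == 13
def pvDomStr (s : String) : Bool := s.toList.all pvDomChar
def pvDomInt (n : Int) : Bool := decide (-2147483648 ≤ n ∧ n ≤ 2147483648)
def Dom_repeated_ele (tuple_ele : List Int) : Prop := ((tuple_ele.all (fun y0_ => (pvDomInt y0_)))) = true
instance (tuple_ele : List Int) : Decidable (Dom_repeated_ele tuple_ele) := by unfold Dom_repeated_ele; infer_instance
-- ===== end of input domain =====

-- B replaces A's all-pairs index scan with two dict passes (count totals, then emit total-seen copies per position); objective: alternative.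


-- ===== PORT A =====
def repeated_ele (tuple_ele : List Int) : List Int :=
  (PySem.List.pyRange 0 (PySem.List.len tuple_ele) 1).foldl (fun repeat_ele i =>
    (PySem.List.pyRange (i + 1) (PySem.List.len tuple_ele) 1).foldl (fun repeat_ele j =>
      if PySem.List.pyGetD tuple_ele i 0 == PySem.List.pyGetD tuple_ele j 0 then
        repeat_ele ++ [PySem.List.pyGetD tuple_ele i 0]
      else repeat_ele) repeat_ele) []

-- ===== PORT B =====
def repeated_ele_alt (tuple_ele : List Int) : List Int :=
  let total : PySem.Dict Int Int :=
    tuple_ele.foldl (fun d v => d.insert v (d.getD v 0 + 1)) PySem.Dict.empty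
  (tuple_ele.foldl (fun (st : PySem.Dict Int Int × List Int) v =>
      let seen := st.1.insert v (st.1.getD v 0 + 1)
      (seen, st.2 ++ List.replicate (total.getD v 0 - seen.getD v 0).toNat v))
    (PySem.Dict.empty, [])).2

-- ===== PRECONDITION & SPEC =====
def Spec_repeated_ele (tuple_ele : List Int) (out : List Int) : Prop := out = repeated_ele_alt tuple_ele
instance (tuple_ele : List Int) (out : List Int) : Decidable (Spec_repeated_ele tuple_ele out) := by unfold Spec_repeated_ele; infer_instance

-- ===== CLAIM (what is proved, stated in full; the proofs are below) =====
def Claim_equal_repeated_ele : Prop := ∀ (tuple_ele : List Int), Dom_repeated_ele tuple_ele → Spec_repeated_ele tuple_ele (repeated_ele tuple_ele)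

-- ===== LEMMAS AND PROOFS =====

def pvRef : List Int → List Int
  | [] => []
  | v :: rest => List.replicate (rest.count v) v ++ pvRef rest

theorem pvFilterAppendIf (v : Int) (ys : List Int) : ∀ acc : List Int,
    ys.foldl (fun acc y => if v == y then acc ++ [v] else acc) acc
      = acc ++ List.replicate (ys.count v) v := by
  induction ys with
  | nil => intro acc; simp
  | cons y ys ih =>
    intro acc
    simp only [List.foldl_cons]
    by_cases h : v = y
    · subst h
      rw [if_pos (by simp), ih]
      simp [List.replicate_succ]
    · rw [if_neg (by simp [h]), ih]
      have h'' : (y == v) = false := by simp [Ne.symm h]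
      simp [List.count_cons, h'']

theorem pvGetD_shift (x : Int) (xs : List Int) (k : Int) (hk : 0 ≤ k) :
    PySem.List.pyGetD (x :: xs) (1 + k) 0 = PySem.List.pyGetD xs k 0 := by
  rw [PySem.List.pyGetD_of_nonneg _ _ (by omega), PySem.List.pyGetD_of_nonneg _ _ hk]
  have h1 : (1 + k).toNat = k.toNat + 1 := by omega
  simp [h1]

theorem pvAform (xs : List Int) : ∀ acc : List Int,
    (PySem.List.pyRange 0 (PySem.List.len xs) 1).foldl
      (fun acc i => acc ++ List.replicate ((xs.drop (i.toNat + 1)).count (PySem.List.pyGetD xs i 0))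
        (PySem.List.pyGetD xs i 0)) acc = acc ++ pvRef xs := by
  induction xs with
  | nil =>
    intro acc
    simp [PySem.List.len_eq, PySem.List.pyRange_one_eq_nil (by omega : (0:Int) ≤ 0), pvRef]
  | cons x xs ih =>
    intro acc
    rw [PySem.List.len_eq,
        PySem.List.pyRange_one_cons (by simp : (0:Int) < ((x :: xs).length : Int))]
    rw [List.foldl_cons]
    have hx0 : PySem.List.pyGetD (x :: xs) 0 0 = x := by
      rw [PySem.List.pyGetD_of_nonneg _ _ le_rfl]; simp
    have hr : PySem.List.pyRange (0 + 1) ((x :: xs).length : Int) =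
        (PySem.List.pyRange 0 ((xs.length : Int))).map (fun k => 1 + k) := by
      rw [PySem.List.pyRange_one, PySem.List.pyRange_one, List.map_map]
      have hA : ((((x :: xs).length : Int)) - (0 + 1)).toNat = ((xs.length : Int) - 0).toNat := by
        simp
      rw [hA]
      refine List.map_congr_left (fun k _ => ?_)
      simp
    rw [hr, List.foldl_map]
    have hbody : ∀ (a : List Int), ∀ i ∈ PySem.List.pyRange 0 ((xs.length : Int)),
        a ++ List.replicate (((x :: xs).drop ((1 + i).toNat + 1)).count
            (PySem.List.pyGetD (x :: xs) (1 + i) 0)) (PySem.List.pyGetD (x :: xs) (1 + i) 0)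
        = a ++ List.replicate ((xs.drop (i.toNat + 1)).count
            (PySem.List.pyGetD xs i 0)) (PySem.List.pyGetD xs i 0) := by
      intro a i hi
      have h0i : 0 ≤ i := (PySem.List.mem_pyRange_one.mp hi).1
      rw [pvGetD_shift x xs i h0i]
      have h2 : (1 + i).toNat + 1 = (i.toNat + 1) + 1 := by omega
      rw [h2, List.drop_succ_cons]
    rw [PySem.List.foldl_congr_mem _ _ _ _ hbody]
    have := ih (acc ++ List.replicate (((x :: xs).drop ((0:Int).toNat + 1)).count
        (PySem.List.pyGetD (x :: xs) 0 0)) (PySem.List.pyGetD (x :: xs) 0 0))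
    rw [PySem.List.len_eq] at this
    rw [this, hx0]
    simp [pvRef]

theorem pvA_eq_ref (xs : List Int) : ∀ acc : List Int,
    (PySem.List.pyRange 0 (PySem.List.len xs) 1).foldl (fun repeat_ele i =>
      (PySem.List.pyRange (i + 1) (PySem.List.len xs) 1).foldl (fun repeat_ele j =>
        if PySem.List.pyGetD xs i 0 == PySem.List.pyGetD xs j 0 then
          repeat_ele ++ [PySem.List.pyGetD xs i 0]
        else repeat_ele) repeat_ele) acc = acc ++ pvRef xs := by
  intro acc
  rw [PySem.List.foldl_congr_mem _ _
      (fun acc i => acc ++ List.replicate ((xs.drop (i.toNat + 1)).count (PySem.List.pyGetD xs i 0))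
        (PySem.List.pyGetD xs i 0)) _ ?_]
  · exact pvAform xs acc
  · intro a i hi
    have h0i : 0 ≤ i := (PySem.List.mem_pyRange_one.mp hi).1
    rw [PySem.List.len_eq,
        PySem.List.foldl_pyRange_pyGetD' xs 0
          (fun acc y => if PySem.List.pyGetD xs i 0 == y then acc ++ [PySem.List.pyGetD xs i 0] else acc)
          a (by omega : (0:Int) ≤ i + 1),
        pvFilterAppendIf]
    have h2 : (i + 1).toNat = i.toNat + 1 := by omega
    rw [h2]

theorem pvB_loop (tot : PySem.Dict Int Int) (xs : List Int)
    (htot : ∀ v, tot.getD v 0 = (xs.count v : Int)) :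
    ∀ (ys p acc : List Int), xs = p ++ ys →
    (ys.foldl (fun (st : PySem.Dict Int Int × List Int) v =>
        let seen := st.1.insert v (st.1.getD v 0 + 1)
        (seen, st.2 ++ List.replicate (tot.getD v 0 - seen.getD v 0).toNat v))
      (p.foldl (fun d v => d.insert v (d.getD v 0 + 1)) PySem.Dict.empty, acc)).2
      = acc ++ pvRef ys := by
  intro ys
  induction ys with
  | nil => intro p acc _; simp [pvRef]
  | cons v ys ih =>
    intro p acc hx
    have hseen : (p.foldl (fun d v => d.insert v (d.getD v 0 + 1))
        (PySem.Dict.empty : PySem.Dict Int Int)).insert v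
        ((p.foldl (fun d v => d.insert v (d.getD v 0 + 1))
          (PySem.Dict.empty : PySem.Dict Int Int)).getD v 0 + 1)
        = (p ++ [v]).foldl (fun d v => d.insert v (d.getD v 0 + 1))
          (PySem.Dict.empty : PySem.Dict Int Int) := by
      rw [List.foldl_append]; rfl
    have hcnt : ((p ++ [v]).foldl (fun d v => d.insert v (d.getD v 0 + 1))
        (PySem.Dict.empty : PySem.Dict Int Int)).getD v 0 = ((p.count v : Int) + 1) := by
      rw [PySem.Dict.getD_foldl_insert_add_one]
      simp [List.count_append]
    have hc : xs.count v = p.count v + 1 + ys.count v := by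
      subst hx; simp [List.count_append]; omega
    have h3 : ((xs.count v : Int) - ((p.count v : Int) + 1)).toNat = ys.count v := by omega
    have key := ih (p ++ [v]) (acc ++ List.replicate (ys.count v) v) (by simpa using hx)
    rw [List.foldl_cons]
    dsimp only at key ⊢
    rw [hseen, hcnt, htot v, h3, key]
    simp [pvRef]

-- ===== VERDICT (by name: the statement is the Claim_ definition above) =====
theorem repeated_ele_spec : Claim_equal_repeated_ele := by
  intro xs _
  unfold Spec_repeated_ele repeated_ele repeated_ele_alt
  have hB := pvB_loop
      (xs.foldl (fun d v => d.insert v (d.getD v 0 + 1)) (PySem.Dict.empty : PySem.Dict Int Int)) xs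
      (fun v => by
        simpa using PySem.Dict.getD_foldl_insert_add_one xs (PySem.Dict.empty : PySem.Dict Int Int) v)
      xs [] [] rfl
  simp only [List.foldl_nil] at hB
  rw [pvA_eq_ref xs []]
  dsimp only
  rw [hB]
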